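-- pv_equiv track=rewrite | github.com/wingedonezero/Video-Sync-GUI | vsg_core/analysis/separation/registry.py | _select_model_filename
-- ===== SOURCE A (Python) =====
-- def _select_model_filename(file_map: dict) -> str | None:
--     if not isinstance(file_map, dict):
--         return None
--
--     preferred_exts = (".ckpt", ".onnx", ".pth", ".pt", ".th")
--     for ext in preferred_exts:
--         for candidate in file_map.keys():
--             if isinstance(candidate, str) and candidate.lower().endswith(ext):
--                 return candidate
--
--     for candidate in file_map.keys():
--         if isinstance(candidate, str) and candidate.lower().endswith((".yaml", ".yml")):
--             return candidate
--
--     for candidate in file_map.keys():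
--         if isinstance(candidate, str):
--             return candidate
--
--     return None
-- ===== SOURCE B (Python) =====
-- def _select_model_filename(file_map: dict) -> str | None:
--     if not isinstance(file_map, dict):
--         return None
--
--     def rank(name: str) -> int:
--         n = name.lower()
--         if n.endswith(".ckpt"):
--             return 0
--         if n.endswith(".onnx"):
--             return 1
--         if n.endswith(".pth"):
--             return 2
--         if n.endswith(".pt"):
--             return 3
--         if n.endswith(".th"):
--             return 4
--         if n.endswith((".yaml", ".yml")):
--             return 5
--         return 6
--
--     best = None  # (key, rank) with the smallest rank seen; ties keep the earliest key
--     for candidate in file_map.keys():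
--         if not isinstance(candidate, str):
--             continue
--         r = rank(candidate)
--         if best is None or r < best[1]:
--             best = (candidate, r)
--     return best[0] if best is not None else None
-- ===== Notes on version B (the rewrite author's own statement) =====
-- stated objective: alternative
-- what changed: Replaces A's up-to-seven sequential rescans of the dict keys with a single pass that ranks each key by its extension (0-4 preferred, 5 yaml/yml, 6 other) and keeps the earliest key of strictly smallest rank.
import Mathlib
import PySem

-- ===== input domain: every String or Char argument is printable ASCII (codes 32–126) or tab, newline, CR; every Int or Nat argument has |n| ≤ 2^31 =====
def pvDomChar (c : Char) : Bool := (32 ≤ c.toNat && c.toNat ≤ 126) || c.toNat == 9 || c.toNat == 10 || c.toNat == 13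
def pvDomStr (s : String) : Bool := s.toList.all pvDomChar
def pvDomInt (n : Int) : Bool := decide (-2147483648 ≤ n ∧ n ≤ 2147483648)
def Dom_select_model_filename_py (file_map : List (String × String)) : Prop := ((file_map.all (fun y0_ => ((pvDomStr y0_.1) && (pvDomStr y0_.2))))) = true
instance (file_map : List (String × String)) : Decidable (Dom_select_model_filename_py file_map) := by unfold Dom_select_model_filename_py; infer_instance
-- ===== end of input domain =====

-- B replaces A's up-to-seven sequential rescans of the keys with a single ranked pass (alternative algorithm, same cost in practice).

-- ===== PORT A =====
-- 'for ext in preferred_exts: for candidate in file_map.keys(): …' — outer loop over the ext tuple,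
-- each iteration a scan of the keys (keys are all str here, so isinstance checks are True).
def pvAExtLoop : List String → List String → Option String
  | [], _ => none
  | e :: es, keys =>
    match keys.find? (fun c => PySem.Str.endswith (PySem.Str.lower c) e) with
    | some c => some c
    | none => pvAExtLoop es keys

def select_model_filename_py (file_map : List (String × String)) : Option String :=
  let keys := (PySem.Dict.ofList file_map).keys
  match pvAExtLoop [".ckpt", ".onnx", ".pth", ".pt", ".th"] keys with
  | some c => some c
  | none =>
    match keys.find? (fun c => PySem.Str.endswith (PySem.Str.lower c) ".yaml" ||
                               PySem.Str.endswith (PySem.Str.lower c) ".yml") with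
    | some c => some c
    | none => keys.head?   -- 'for candidate in keys: return candidate' = first key, else None

-- ===== PORT B =====
-- rank(name): 0..4 for the preferred extensions, 5 for .yaml/.yml, 6 otherwise
def pvRank (name : String) : Int :=
  if PySem.Str.endswith (PySem.Str.lower name) ".ckpt" then 0
  else if PySem.Str.endswith (PySem.Str.lower name) ".onnx" then 1
  else if PySem.Str.endswith (PySem.Str.lower name) ".pth" then 2
  else if PySem.Str.endswith (PySem.Str.lower name) ".pt" then 3
  else if PySem.Str.endswith (PySem.Str.lower name) ".th" then 4
  else if PySem.Str.endswith (PySem.Str.lower name) ".yaml" || PySem.Str.endswith (PySem.Str.lower name) ".yml" then 5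
  else 6

-- loop body: keep (key, rank) with the strictly smallest rank (ties keep the earliest key)
def pvStep (best : Option (String × Int)) (candidate : String) : Option (String × Int) :=
  match best with
  | none => some (candidate, pvRank candidate)
  | some br => if pvRank candidate < br.2 then some (candidate, pvRank candidate) else some br

-- single pass over the keys
def select_model_filename_py_alt (file_map : List (String × String)) : Option String :=
  let keys := (PySem.Dict.ofList file_map).keys
  match keys.foldl pvStep none with
  | some br => some br.1
  | none => none

-- ===== PRECONDITION & SPEC =====
def Spec_select_model_filename_py (file_map : List (String × String)) (out : Option String) : Prop := out = select_model_filename_py_alt file_map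
instance (file_map : List (String × String)) (out : Option String) : Decidable (Spec_select_model_filename_py file_map out) := by unfold Spec_select_model_filename_py; infer_instance

-- ===== CLAIM (what is proved, stated in full; the proofs are below) =====
def Claim_equal_select_model_filename_py : Prop := ∀ (file_map : List (String × String)), Dom_select_model_filename_py file_map → Spec_select_model_filename_py file_map (select_model_filename_py file_map)

-- ===== LEMMAS AND PROOFS =====

-- reference: earliest key of minimal rank
def pvMinKey : List String → Option String
  | [] => none
  | k :: l =>
    match pvMinKey l with
    | none => some k
    | some b => if pvRank k ≤ pvRank b then some k else some b

lemma pvFind?_congr {α : Type} (p q : α → Bool) (l : List α) (h : ∀ a, p a = q a) :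
    l.find? p = l.find? q := by
  induction l with
  | nil => rfl
  | cons x xs ih => simp [List.find?, h x, ih]

-- two suffixes of the same string are comparable; our seven extension literals are pairwise not
lemma pvEndsNotBoth (s e1 e2 : String) (h₁ : ¬ e1.toList <:+ e2.toList)
    (h₂ : ¬ e2.toList <:+ e1.toList) :
    ¬ (PySem.Str.endswith s e1 = true ∧ PySem.Str.endswith s e2 = true) := by
  rintro ⟨a1, a2⟩
  simp only [PySem.Str.endswith_eq, PySem.Chars.endswith_iff] at a1 a2
  rcases List.suffix_or_suffix_of_suffix a1 a2 with h | h
  · exact h₁ h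
  · exact h₂ h

lemma pvRank_le_six (k : String) : pvRank k ≤ 6 := by
  unfold pvRank; split_ifs <;> norm_num

lemma pvPred_ckpt (k : String) :
    PySem.Str.endswith (PySem.Str.lower k) ".ckpt" = (pvRank k == 0) := by
  unfold pvRank
  split_ifs <;> simp_all

lemma pvPred_onnx (k : String) :
    PySem.Str.endswith (PySem.Str.lower k) ".onnx" = (pvRank k == 1) := by
  have d1 := pvEndsNotBoth (PySem.Str.lower k) ".ckpt" ".onnx" (by decide) (by decide)
  unfold pvRank
  split_ifs <;> simp_all

lemma pvPred_pth (k : String) :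
    PySem.Str.endswith (PySem.Str.lower k) ".pth" = (pvRank k == 2) := by
  have d1 := pvEndsNotBoth (PySem.Str.lower k) ".ckpt" ".pth" (by decide) (by decide)
  have d2 := pvEndsNotBoth (PySem.Str.lower k) ".onnx" ".pth" (by decide) (by decide)
  unfold pvRank
  split_ifs <;> simp_all

lemma pvPred_pt (k : String) :
    PySem.Str.endswith (PySem.Str.lower k) ".pt" = (pvRank k == 3) := by
  have d1 := pvEndsNotBoth (PySem.Str.lower k) ".ckpt" ".pt" (by decide) (by decide)
  have d2 := pvEndsNotBoth (PySem.Str.lower k) ".onnx" ".pt" (by decide) (by decide)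
  have d3 := pvEndsNotBoth (PySem.Str.lower k) ".pth" ".pt" (by decide) (by decide)
  unfold pvRank
  split_ifs <;> simp_all

lemma pvPred_th (k : String) :
    PySem.Str.endswith (PySem.Str.lower k) ".th" = (pvRank k == 4) := by
  have d1 := pvEndsNotBoth (PySem.Str.lower k) ".ckpt" ".th" (by decide) (by decide)
  have d2 := pvEndsNotBoth (PySem.Str.lower k) ".onnx" ".th" (by decide) (by decide)
  have d3 := pvEndsNotBoth (PySem.Str.lower k) ".pth" ".th" (by decide) (by decide)
  have d4 := pvEndsNotBoth (PySem.Str.lower k) ".pt" ".th" (by decide) (by decide)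
  unfold pvRank
  split_ifs <;> simp_all

lemma pvPred_yaml (k : String) :
    (PySem.Str.endswith (PySem.Str.lower k) ".yaml" ||
     PySem.Str.endswith (PySem.Str.lower k) ".yml") = (pvRank k == 5) := by
  have d1 := pvEndsNotBoth (PySem.Str.lower k) ".ckpt" ".yaml" (by decide) (by decide)
  have d2 := pvEndsNotBoth (PySem.Str.lower k) ".onnx" ".yaml" (by decide) (by decide)
  have d3 := pvEndsNotBoth (PySem.Str.lower k) ".pth" ".yaml" (by decide) (by decide)
  have d4 := pvEndsNotBoth (PySem.Str.lower k) ".pt" ".yaml" (by decide) (by decide)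
  have d5 := pvEndsNotBoth (PySem.Str.lower k) ".th" ".yaml" (by decide) (by decide)
  have e1 := pvEndsNotBoth (PySem.Str.lower k) ".ckpt" ".yml" (by decide) (by decide)
  have e2 := pvEndsNotBoth (PySem.Str.lower k) ".onnx" ".yml" (by decide) (by decide)
  have e3 := pvEndsNotBoth (PySem.Str.lower k) ".pth" ".yml" (by decide) (by decide)
  have e4 := pvEndsNotBoth (PySem.Str.lower k) ".pt" ".yml" (by decide) (by decide)
  have e5 := pvEndsNotBoth (PySem.Str.lower k) ".th" ".yml" (by decide) (by decide)
  unfold pvRank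
  split_ifs <;> simp_all

-- pvMinKey facts
lemma pvRank_nonneg (k : String) : 0 ≤ pvRank k := by
  unfold pvRank; split_ifs <;> norm_num

lemma pvMinKey_cons (k : String) (l : List String) :
    pvMinKey (k :: l) = match pvMinKey l with
      | none => some k
      | some b => if pvRank k ≤ pvRank b then some k else some b := rfl

lemma pvMinKey_eq_none {l : List String} : pvMinKey l = none ↔ l = [] := by
  cases l with
  | nil => simp [pvMinKey]
  | cons k l =>
    simp only [pvMinKey_cons, List.cons_ne_nil, iff_false]
    cases pvMinKey l
    · simp
    · simp only
      split <;> simp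

lemma pvMinKey_min {l : List String} {m : String} (h : pvMinKey l = some m) :
    ∀ k ∈ l, pvRank m ≤ pvRank k := by
  induction l generalizing m with
  | nil => simp [pvMinKey] at h
  | cons x l ih =>
    intro k hk
    rw [pvMinKey_cons] at h
    rcases hx : pvMinKey l with _ | b <;> simp only [hx] at h
    · have hl := pvMinKey_eq_none.mp hx; subst hl
      injection h with h; subst h
      simp only [List.mem_singleton] at hk; subst hk
      exact le_refl _
    · have hb := ih hx
      rcases List.mem_cons.mp hk with rfl | hk'
      · split at h <;> rename_i hcmp <;>
          (simp only [Option.some.injEq] at h; subst h)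
        · exact le_refl _
        · omega
      · have hbk := hb k hk'
        split at h <;> rename_i hcmp <;>
          (simp only [Option.some.injEq] at h; subst h)
        · omega
        · exact hbk

lemma pvMinKey_find {l : List String} {m : String} (h : pvMinKey l = some m) :
    l.find? (fun k => pvRank k == pvRank m) = some m := by
  induction l generalizing m with
  | nil => simp [pvMinKey] at h
  | cons x l ih =>
    rw [pvMinKey_cons] at h
    rcases hx : pvMinKey l with _ | b <;> simp only [hx] at h
    · injection h with h; subst h
      simp
    · split at h <;> rename_i hcmp <;>
        (simp only [Option.some.injEq] at h; subst h)
      · simp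
      · have hne : pvRank x ≠ pvRank b := by omega
        rw [List.find?_cons_of_neg (by simp [hne])]
        exact ih hx

lemma pvFold_min (l : List String) (b : String) :
    l.foldl pvStep (some (b, pvRank b))
      = (pvMinKey (b :: l)).map (fun m => (m, pvRank m)) := by
  induction l generalizing b with
  | nil => simp [pvMinKey]
  | cons x l ih =>
    rw [List.foldl_cons]
    by_cases hxb : pvRank x < pvRank b
    · rw [show pvStep (some (b, pvRank b)) x = some (x, pvRank x) from by
        simp [pvStep, hxb]]
      rw [ih x]
      rcases hmx : pvMinKey (x :: l) with _ | m
      · exact absurd (pvMinKey_eq_none.mp hmx) (by simp)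
      · have hmle : pvRank m ≤ pvRank x := pvMinKey_min hmx x (by simp)
        rw [pvMinKey_cons b (x :: l), hmx]
        simp only
        rw [if_neg (by omega)]
    · rw [show pvStep (some (b, pvRank b)) x = some (b, pvRank b) from by
        simp [pvStep, hxb]]
      rw [ih b]
      congr 1
      rcases hml : pvMinKey l with _ | m
      · have hl := pvMinKey_eq_none.mp hml; subst hl
        simp only [pvMinKey, if_pos (by omega : pvRank b ≤ pvRank x)]
      · rw [pvMinKey_cons b l, pvMinKey_cons b (x :: l), pvMinKey_cons x l, hml]
        simp only
        by_cases hxm : pvRank x ≤ pvRank m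
        · rw [if_pos hxm]
          simp only
          rw [if_pos (by omega : pvRank b ≤ pvRank x), if_pos (by omega : pvRank b ≤ pvRank m)]
        · rw [if_neg hxm]

lemma pvAlt_eq_min (l : List String) :
    (match l.foldl pvStep none with
     | some br => some br.1
     | none => none) = pvMinKey l := by
  cases l with
  | nil => simp [pvMinKey]
  | cons x l =>
    rw [List.foldl_cons]
    rw [show pvStep none x = some (x, pvRank x) from rfl]
    rw [pvFold_min l x]
    rcases hmx : pvMinKey (x :: l) with _ | m
    · exact absurd (pvMinKey_eq_none.mp hmx) (by simp)
    · simp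

-- find? of a lower rank than the minimum is none
lemma pvFind_lt_none {l : List String} {m : String} (h : pvMinKey l = some m)
    (j : Int) (hj : j < pvRank m) : l.find? (fun k => pvRank k == j) = none := by
  rw [List.find?_eq_none]
  intro k hk
  have := pvMinKey_min h k hk
  simp only [beq_iff_eq]
  omega

-- the A chain computes pvMinKey
lemma pvA_eq_min (l : List String) :
    (match pvAExtLoop [".ckpt", ".onnx", ".pth", ".pt", ".th"] l with
     | some c => some c
     | none =>
       match l.find? (fun c => PySem.Str.endswith (PySem.Str.lower c) ".yaml" ||
                               PySem.Str.endswith (PySem.Str.lower c) ".yml") with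
       | some c => some c
       | none => l.head?) = pvMinKey l := by
  rcases hm : pvMinKey l with _ | m
  · rw [pvMinKey_eq_none.mp hm]
    simp [pvAExtLoop]
  · -- rewrite every predicate to a rank test
    simp only [pvAExtLoop,
      pvFind?_congr _ _ l (pvPred_ckpt), pvFind?_congr _ _ l (pvPred_onnx),
      pvFind?_congr _ _ l (pvPred_pth), pvFind?_congr _ _ l (pvPred_pt),
      pvFind?_congr _ _ l (pvPred_th), pvFind?_congr _ _ l (pvPred_yaml)]
    have h6 := pvRank_le_six m
    have h0 := pvRank_nonneg m
    have hfind := pvMinKey_find hm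
    have hr := pvMinKey_min hm
    -- case on the minimal rank
    set r := pvRank m with hrdef
    interval_cases r
    · rw [hfind]
    · rw [pvFind_lt_none hm 0 (by omega), hfind]
    · rw [pvFind_lt_none hm 0 (by omega), pvFind_lt_none hm 1 (by omega), hfind]
    · rw [pvFind_lt_none hm 0 (by omega), pvFind_lt_none hm 1 (by omega),
        pvFind_lt_none hm 2 (by omega), hfind]
    · rw [pvFind_lt_none hm 0 (by omega), pvFind_lt_none hm 1 (by omega),
        pvFind_lt_none hm 2 (by omega), pvFind_lt_none hm 3 (by omega), hfind]
    · rw [pvFind_lt_none hm 0 (by omega), pvFind_lt_none hm 1 (by omega),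
        pvFind_lt_none hm 2 (by omega), pvFind_lt_none hm 3 (by omega),
        pvFind_lt_none hm 4 (by omega), hfind]
    · -- minimal rank 6: every find? is none and the head is the minimum
      rw [pvFind_lt_none hm 0 (by omega), pvFind_lt_none hm 1 (by omega),
        pvFind_lt_none hm 2 (by omega), pvFind_lt_none hm 3 (by omega),
        pvFind_lt_none hm 4 (by omega), pvFind_lt_none hm 5 (by omega)]
      cases l with
      | nil => simp [pvMinKey] at hm
      | cons x l' =>
        have hx6 : pvRank x = 6 := by
          have h1 := hr x (by simp)
          have h2 := pvRank_le_six x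
          omega
        simp only [List.find?, hx6] at hfind
        simp only [beq_self_eq_true, Option.some.injEq] at hfind
        simp [hfind]

-- ===== VERDICT (by name: the statement is the Claim_ definition above) =====
theorem select_model_filename_py_spec : Claim_equal_select_model_filename_py := by
  intro file_map _
  unfold Spec_select_model_filename_py select_model_filename_py select_model_filename_py_alt
  rw [pvAlt_eq_min, pvA_eq_min]
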